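-- pv_equiv track=rewrite | github.com/fixxxera/Royal-Caribbean | main.py | split_repo
-- ===== SOURCE A (Python) =====
-- def split_repo(ports, dn, dc):
--     wc = ['Costa Maya, Mexico', 'Cozumel, Mexico', 'Falmouth, Jamaica', 'George Town, Grand Cayman',
--           'Ocho Rios, Jamaica']
--
--     ec = ['Basseterre, St. Kitts', 'Bridgetown, Barbados', 'Castries, St. Lucia', 'Charlotte Amalie, St. Thomas',
--           'Fort De France', 'Kingstown, St. Vincent', 'Philipsburg, St. Maarten', 'Ponce, Puerto Rico',
--           'Punta Cana, Dominican Rep', 'Roseau, Dominica', 'San Juan, Puerto Rico', 'St. Croix, U.S.V.I.',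
--           "St. George's, Grenada", "St. John's, Antigua", 'Tortola, B.V.I']
--     nn = ['Halifax', 'Charlottetown']
--     ports_list = []
--     for i in range(len(ports)):
--
--         if i == 0:
--             pass
--         else:
--             ports_list.append(ports[i])
--
--     for element in wc:
--         for p in ports_list:
--             if p in element or element in p:
--                 return ['West Carib', 'C']
--
--     for element in ec:
--         for p in ports_list:
--             if p in element or element in p:
--                 return ['East Carib', 'C']
--
--     for element in nn:
--         for p in ports_list:
--             if p in element or element in p:
--                 return ['Can/New En', 'NN']
--     return [dn, dc]
-- ===== SOURCE B (Python) =====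
-- def split_repo(ports, dn, dc):
--     wc = ['Costa Maya, Mexico', 'Cozumel, Mexico', 'Falmouth, Jamaica', 'George Town, Grand Cayman',
--           'Ocho Rios, Jamaica']
--
--     ec = ['Basseterre, St. Kitts', 'Bridgetown, Barbados', 'Castries, St. Lucia', 'Charlotte Amalie, St. Thomas',
--           'Fort De France', 'Kingstown, St. Vincent', 'Philipsburg, St. Maarten', 'Ponce, Puerto Rico',
--           'Punta Cana, Dominican Rep', 'Roseau, Dominica', 'San Juan, Puerto Rico', 'St. Croix, U.S.V.I.',
--           "St. George's, Grenada", "St. John's, Antigua", 'Tortola, B.V.I']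
--     nn = ['Halifax', 'Charlottetown']
--     tables = [(wc, ['West Carib', 'C']), (ec, ['East Carib', 'C']), (nn, ['Can/New En', 'NN'])]
--
--     def region(p):
--         # index of the highest-priority region table that p matches, 3 if none
--         for idx, (table, _res) in enumerate(tables):
--             if any(p in e or e in p for e in table):
--                 return idx
--         return 3
--
--     # single port-major pass, tracking the best (lowest) region index seen
--     best = 3
--     for p in ports[1:]:
--         best = min(best, region(p))
--     return tables[best][1] if best < 3 else [dn, dc]
-- ===== Notes on version B (the rewrite author's own statement) =====
-- stated objective: alternative
-- what changed: Replaces A's three sequential element-major nested scans with early return by a single port-major pass that tracks the minimum (highest-priority) matching region index per port and selects the result at the end.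
import Mathlib
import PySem

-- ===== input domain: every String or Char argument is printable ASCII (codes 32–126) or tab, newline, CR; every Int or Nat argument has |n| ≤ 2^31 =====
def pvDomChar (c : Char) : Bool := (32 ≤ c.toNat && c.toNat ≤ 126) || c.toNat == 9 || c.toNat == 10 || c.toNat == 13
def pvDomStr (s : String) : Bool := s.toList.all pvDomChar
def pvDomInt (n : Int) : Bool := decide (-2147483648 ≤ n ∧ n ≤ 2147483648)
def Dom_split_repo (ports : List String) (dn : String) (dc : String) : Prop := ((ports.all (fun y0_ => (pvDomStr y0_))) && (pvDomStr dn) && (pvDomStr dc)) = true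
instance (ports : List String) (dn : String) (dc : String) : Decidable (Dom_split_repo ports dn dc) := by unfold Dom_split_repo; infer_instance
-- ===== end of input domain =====

-- B replaces A's three sequential element-major scans (each with early return) by one
-- port-major pass tracking the minimum matching region index; alternative decomposition, same cost.


-- ===== PORT A =====
def wcL : List String := ["Costa Maya, Mexico", "Cozumel, Mexico", "Falmouth, Jamaica",
  "George Town, Grand Cayman", "Ocho Rios, Jamaica"]
def ecL : List String := ["Basseterre, St. Kitts", "Bridgetown, Barbados", "Castries, St. Lucia",
  "Charlotte Amalie, St. Thomas", "Fort De France", "Kingstown, St. Vincent",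
  "Philipsburg, St. Maarten", "Ponce, Puerto Rico", "Punta Cana, Dominican Rep",
  "Roseau, Dominica", "San Juan, Puerto Rico", "St. Croix, U.S.V.I.",
  "St. George's, Grenada", "St. John's, Antigua", "Tortola, B.V.I"]
def nnL : List String := ["Halifax", "Charlottetown"]

def split_repo (ports : List String) (dn : String) (dc : String) : List String :=
  -- for i in range(len(ports)): if i == 0: pass else: ports_list.append(ports[i])
  let ports_list := (PySem.List.pyRange 0 (ports.length : Int) 1).foldl
      (fun acc i => if i == 0 then acc else acc ++ [PySem.List.pyGetD ports i ""]) []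
  -- three element-major nested scans, each an early return on the first match
  match wcL.findSome? (fun e => ports_list.findSome? (fun p =>
      if PySem.Str.isIn p e || PySem.Str.isIn e p then some ["West Carib", "C"] else none)) with
  | some r => r
  | none =>
    match ecL.findSome? (fun e => ports_list.findSome? (fun p =>
        if PySem.Str.isIn p e || PySem.Str.isIn e p then some ["East Carib", "C"] else none)) with
    | some r => r
    | none =>
      match nnL.findSome? (fun e => ports_list.findSome? (fun p =>
          if PySem.Str.isIn p e || PySem.Str.isIn e p then some ["Can/New En", "NN"] else none)) with
      | some r => r
      | none => [dn, dc]

-- ===== PORT B =====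
def pvMatch (p e : String) : Bool := PySem.Str.isIn p e || PySem.Str.isIn e p

def pvTables : List (List String × List String) :=
  [(wcL, ["West Carib", "C"]), (ecL, ["East Carib", "C"]), (nnL, ["Can/New En", "NN"])]

-- def region(p): first table index p matches, else 3
def pvRegion (p : String) : Nat :=
  (pvTables.findIdx? (fun t => t.1.any (fun e => pvMatch p e))).getD 3

def split_repo_alt (ports : List String) (dn : String) (dc : String) : List String :=
  -- best = 3; for p in ports[1:]: best = min(best, region(p))
  let best := (PySem.List.slice ports (some 1) none).foldl (fun b p => min b (pvRegion p)) 3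
  if best < 3 then (pvTables.getD best ([], [])).2 else [dn, dc]

-- ===== PRECONDITION & SPEC =====
def Spec_split_repo (ports : List String) (dn : String) (dc : String) (out : List String) : Prop := out = split_repo_alt ports dn dc
instance (ports : List String) (dn : String) (dc : String) (out : List String) : Decidable (Spec_split_repo ports dn dc out) := by unfold Spec_split_repo; infer_instance

-- ===== CLAIM (what is proved, stated in full; the proofs are below) =====
def Claim_equal_split_repo : Prop := ∀ (ports : List String) (dn : String) (dc : String), Dom_split_repo ports dn dc → Spec_split_repo ports dn dc (split_repo ports dn dc)

-- ===== LEMMAS AND PROOFS =====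

-- the inner early-return scan returns the constant r iff some port matches
theorem findSome?_const {α : Type} (pl : List String) (c : String → Bool) (r : α) :
    pl.findSome? (fun p => if c p then some r else none)
      = if pl.any c then some r else none := by
  induction pl with
  | nil => rfl
  | cons x t ih => by_cases h : c x <;> simp [h, ih]

theorem findSome?_nested (l : List String) (pl : List String) (r : List String)
    (c : String → String → Bool) :
    l.findSome? (fun e => pl.findSome? (fun p => if c p e then some r else none))
      = if l.any (fun e => pl.any (fun p => c p e)) then some r else none := by
  induction l with
  | nil => rfl
  | cons x t ih =>
    rw [List.findSome?_cons, findSome?_const, List.any_cons]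
    by_cases h : pl.any (fun p => c p x)
    · rw [if_pos h, h, Bool.true_or, if_pos rfl]
    · have h' : pl.any (fun p => c p x) = false := by simpa using h
      rw [if_neg h, h', Bool.false_or]
      exact ih

theorem foldl_app {α : Type} (l : List α) (acc : List α) :
    l.foldl (fun a y => a ++ [y]) acc = acc ++ l := by
  induction l generalizing acc with
  | nil => simp
  | cons b s ih => simp [ih]

-- A's index loop builds exactly ports[1:]
theorem ports_list_eq (ports : List String) :
    (PySem.List.pyRange 0 (ports.length : Int) 1).foldl
      (fun acc i => if i == 0 then acc else acc ++ [PySem.List.pyGetD ports i ""]) []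
      = ports.tail := by
  cases ports with
  | nil => rfl
  | cons x t =>
    rw [PySem.List.pyRange_one_cons (by simp)]
    simp only [List.foldl_cons, beq_self_eq_true, if_pos, zero_add]
    rw [PySem.List.foldl_congr_mem
      (PySem.List.pyRange 1 ((x :: t).length : Int))
      (fun acc i => if i == 0 then acc else acc ++ [PySem.List.pyGetD (x :: t) i ""])
      (fun acc i => acc ++ [PySem.List.pyGetD (x :: t) i ""]) []
      (by
        intro acc i hi
        have h1 := (PySem.List.mem_pyRange_one).mp hi
        have h2 : ¬ (i == 0) = true := by simp; omega
        simp [h2])]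
    have hfold := PySem.List.foldl_pyRange_pyGetD (x :: t) "" (fun acc y => acc ++ [y])
      ([] : List String) (a := 1) (by omega)
    simp only [PySem.List.len_eq] at hfold
    rw [hfold, foldl_app]
    simp

-- element-major ↔ port-major
theorem any_swap (l pl : List String) (c : String → String → Bool) :
    l.any (fun e => pl.any (fun p => c p e)) = pl.any (fun p => l.any (fun e => c p e)) := by
  apply Bool.eq_iff_iff.mpr
  simp only [List.any_eq_true]
  tauto

theorem pvRegion_eq (p : String) :
    pvRegion p = if wcL.any (fun e => pvMatch p e) then 0
      else if ecL.any (fun e => pvMatch p e) then 1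
      else if nnL.any (fun e => pvMatch p e) then 2 else 3 := by
  unfold pvRegion pvTables
  rcases Bool.eq_false_or_eq_true (wcL.any (fun e => pvMatch p e)) with h0 | h0 <;>
    rcases Bool.eq_false_or_eq_true (ecL.any (fun e => pvMatch p e)) with h1 | h1 <;>
      rcases Bool.eq_false_or_eq_true (nnL.any (fun e => pvMatch p e)) with h2 | h2 <;>
        simp [List.findIdx?_cons, h0, h1, h2]

-- running min of a projection: lower bounds and membership
theorem foldl_minp_le {α : Type} (f : α → Nat) (t : List α) (a : Nat) :
    t.foldl (fun b p => min b (f p)) a ≤ a ∧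
      ∀ x ∈ t, t.foldl (fun b p => min b (f p)) a ≤ f x := by
  induction t generalizing a with
  | nil => simp
  | cons y s ih =>
    simp only [List.foldl_cons]
    refine ⟨le_trans (ih (min a (f y))).1 (by omega), ?_⟩
    intro x hx
    rcases List.mem_cons.mp hx with h' | hx'
    · rw [h']
      exact le_trans (ih (min a (f y))).1 (by omega)
    · exact (ih (min a (f y))).2 x hx'

theorem foldl_minp_mem {α : Type} (f : α → Nat) (t : List α) (a : Nat) :
    t.foldl (fun b p => min b (f p)) a = a ∨
      ∃ x ∈ t, t.foldl (fun b p => min b (f p)) a = f x := by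
  induction t generalizing a with
  | nil => simp
  | cons y s ih =>
    simp only [List.foldl_cons]
    rcases ih (min a (f y)) with h | ⟨x, hx, h⟩
    · by_cases hy : a ≤ f y
      · left; rw [h]; omega
      · right; exact ⟨y, List.mem_cons_self, by rw [h]; omega⟩
    · right; exact ⟨x, List.mem_cons_of_mem y hx, h⟩

-- the running min lands on the best matching region index of the port list
theorem best_eq (t : List String) :
    t.foldl (fun b p => min b (pvRegion p)) 3
      = if t.any (fun p => wcL.any (fun e => pvMatch p e)) then 0
        else if t.any (fun p => ecL.any (fun e => pvMatch p e)) then 1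
        else if t.any (fun p => nnL.any (fun e => pvMatch p e)) then 2 else 3 := by
  have hle := foldl_minp_le pvRegion t 3
  have hmem := foldl_minp_mem pvRegion t 3
  by_cases h0 : t.any (fun p => wcL.any (fun e => pvMatch p e))
  · rw [if_pos h0]
    rcases List.any_eq_true.mp h0 with ⟨p, hp, hc⟩
    have := hle.2 p hp
    rw [pvRegion_eq, hc] at this
    simpa using this
  · have r0 : ∀ p ∈ t, pvRegion p ≠ 0 := by
      intro p hp hz
      apply h0
      rw [pvRegion_eq] at hz
      split_ifs at hz with hw he hn
      · exact List.any_eq_true.mpr ⟨p, hp, hw⟩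
    by_cases h1 : t.any (fun p => ecL.any (fun e => pvMatch p e))
    · rw [if_neg h0, if_pos h1]
      rcases List.any_eq_true.mp h1 with ⟨p, hp, hc⟩
      have hub := hle.2 p hp
      have hpv : pvRegion p ≤ 1 := by
        rw [pvRegion_eq, hc]
        split_ifs <;> simp_all
      have hub' : t.foldl (fun b p => min b (pvRegion p)) 3 ≤ 1 := le_trans hub hpv
      rcases hmem with h | ⟨x, hx, h⟩
      · omega
      · have := r0 x hx; omega
    · have r1 : ∀ p ∈ t, 2 ≤ pvRegion p := by
        intro p hp
        have := r0 p hp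
        rw [pvRegion_eq] at this ⊢
        split_ifs with hw he hn
        · simp_all
        · exact absurd (List.any_eq_true.mpr ⟨p, hp, he⟩) h1
        · omega
        · omega
      by_cases h2 : t.any (fun p => nnL.any (fun e => pvMatch p e))
      · rw [if_neg h0, if_neg h1, if_pos h2]
        rcases List.any_eq_true.mp h2 with ⟨p, hp, hc⟩
        have hub := hle.2 p hp
        have hpv : pvRegion p ≤ 2 := by
          rw [pvRegion_eq, hc]
          split_ifs <;> simp_all
        have hub' : t.foldl (fun b p => min b (pvRegion p)) 3 ≤ 2 := le_trans hub hpv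
        rcases hmem with h | ⟨x, hx, h⟩
        · omega
        · have := r1 x hx; omega
      · have r2 : ∀ p ∈ t, pvRegion p = 3 := by
          intro p hp
          rw [pvRegion_eq]
          split_ifs with hw he hn
          · exact absurd (List.any_eq_true.mpr ⟨p, hp, hw⟩) h0
          · exact absurd (List.any_eq_true.mpr ⟨p, hp, he⟩) h1
          · exact absurd (List.any_eq_true.mpr ⟨p, hp, hn⟩) h2
          · rfl
        rw [if_neg h0, if_neg h1, if_neg h2]
        rcases hmem with h | ⟨x, hx, h⟩
        · exact h
        · rw [h]; exact r2 x hx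

-- ===== VERDICT (by name: the statement is the Claim_ definition above) =====
theorem split_repo_spec : Claim_equal_split_repo := by
  intro ports dn dc _
  unfold Spec_split_repo split_repo split_repo_alt
  simp only [ports_list_eq, PySem.List.slice_from_one, best_eq, findSome?_nested, pvMatch]
  rw [any_swap wcL, any_swap ecL, any_swap nnL]
  rcases Bool.eq_false_or_eq_true (ports.tail.any (fun p => wcL.any (fun e => PySem.Str.isIn p e || PySem.Str.isIn e p))) with h0 | h0 <;>
    rcases Bool.eq_false_or_eq_true (ports.tail.any (fun p => ecL.any (fun e => PySem.Str.isIn p e || PySem.Str.isIn e p))) with h1 | h1 <;>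
      rcases Bool.eq_false_or_eq_true (ports.tail.any (fun p => nnL.any (fun e => PySem.Str.isIn p e || PySem.Str.isIn e p))) with h2 | h2 <;>
        simp only [h0, h1, h2] <;> simp [pvTables]
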